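-- pv_equiv track=rewrite | github.com/avinash-kulkarni05/digital-protocol-demo | backend_vNext/eligibility_analyzer/interpretation/stage12_qeb_builder.py | _aggregate_queryable_status
-- ===== SOURCE A (Python) =====
-- from typing import Dict, Any, Optional, List, Tuple, Set
--
-- def _aggregate_queryable_status(
--
--     atomics: List[Dict[str, Any]],
-- ) -> str:
--     """
--     Aggregate queryable status from multiple atomics.
--
--     Priority order (most restrictive to least):
--     1. requires_manual - always requires chart review
--     2. screening_only - requires real-time assessment
--     3. llm_extractable - can be extracted from notes
--     4. hybrid_queryable - SQL + LLM
--     5. partially_queryable - some aspects queryable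
--     6. fully_queryable - fully queryable via SQL
--     7. not_applicable - consent/compliance (doesn't affect queryability)
--
--     Returns the most restrictive status.
--     """
--     statuses = [a.get("queryableStatus", "fully_queryable") for a in atomics]
--
--     # Priority order from most to least restrictive
--     priority_order = [
--         "requires_manual",
--         "screening_only",
--         "llm_extractable",
--         "hybrid_queryable",
--         "partially_queryable",
--         "fully_queryable",
--         "not_applicable",
--     ]
--
--     for status in priority_order:
--         if status in statuses:
--             return status
--
--     return "fully_queryable"
-- ===== SOURCE B (Python) =====
-- def _aggregate_queryable_status(atomics):
--     priority_order = [
--         "requires_manual",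
--         "screening_only",
--         "llm_extractable",
--         "hybrid_queryable",
--         "partially_queryable",
--         "fully_queryable",
--         "not_applicable",
--     ]
--     rank = {s: i for i, s in enumerate(priority_order)}
--     best = None  # (rank, status) of most restrictive known status seen so far
--     for a in atomics:
--         s = a.get("queryableStatus", "fully_queryable")
--         i = rank.get(s)
--         if i is not None and (best is None or i < best[0]):
--             best = (i, s)
--     return best[1] if best is not None else "fully_queryable"
-- ===== Notes on version B (the rewrite author's own statement) =====
-- stated objective: alternative
-- what changed: A builds the full statuses list and then scans it up to seven times, once per priority level; B builds a rank dict (status -> priority index) once and makes a single pass over atomics tracking the minimum rank seen, returning its status (or 'fully_queryable' if none known).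
import Mathlib
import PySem

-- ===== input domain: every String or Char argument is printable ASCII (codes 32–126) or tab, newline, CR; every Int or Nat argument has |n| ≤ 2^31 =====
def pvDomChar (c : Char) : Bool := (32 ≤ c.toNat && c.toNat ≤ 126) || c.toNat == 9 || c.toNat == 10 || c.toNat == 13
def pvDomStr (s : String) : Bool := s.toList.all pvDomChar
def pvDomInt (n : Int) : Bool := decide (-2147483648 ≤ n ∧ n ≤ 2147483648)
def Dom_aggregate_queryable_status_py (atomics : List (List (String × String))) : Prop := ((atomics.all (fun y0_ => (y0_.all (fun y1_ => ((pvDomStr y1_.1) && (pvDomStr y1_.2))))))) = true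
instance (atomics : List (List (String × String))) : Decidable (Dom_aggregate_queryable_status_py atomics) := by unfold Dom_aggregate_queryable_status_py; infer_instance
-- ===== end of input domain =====

-- B replaces A's build-statuses-then-scan-the-priority-list shape (up to 7 membership
-- scans) by a rank dict (status -> index) and one min-tracking pass over atomics.

-- ===== PORT A =====
def pvPriority : List String :=
  ["requires_manual", "screening_only", "llm_extractable", "hybrid_queryable",
   "partially_queryable", "fully_queryable", "not_applicable"]

-- the 'for status in priority_order: if status in statuses: return status' loop
def pvLoopA : List String → List String → String
  | [], _ => "fully_queryable"
  | p :: rest, statuses => if statuses.contains p then p else pvLoopA rest statuses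

def aggregate_queryable_status_py (atomics : List (List (String × String))) : String :=
  let statuses := atomics.map (fun a =>
    PySem.Dict.getD (PySem.Dict.mk a) "queryableStatus" "fully_queryable")
  pvLoopA pvPriority statuses

-- ===== PORT B =====
-- rank = {s: i for i, s in enumerate(priority_order)}
def pvRank : PySem.Dict String Int :=
  (PySem.List.enumerate pvPriority).foldl (fun d p => d.insert p.2 p.1) PySem.Dict.empty

def aggregate_queryable_status_py_alt (atomics : List (List (String × String))) : String :=
  let best := atomics.foldl (fun best a =>
    let s := PySem.Dict.getD (PySem.Dict.mk a) "queryableStatus" "fully_queryable"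
    match PySem.Dict.get? pvRank s with
    | none => best
    | some i =>
      match best with
      | none => some (i, s)
      | some b => if i < b.1 then some (i, s) else best) (none : Option (Int × String))
  match best with
  | none => "fully_queryable"
  | some b => b.2

-- ===== PRECONDITION & SPEC =====
def Spec_aggregate_queryable_status_py (atomics : List (List (String × String))) (out : String) : Prop := out = aggregate_queryable_status_py_alt atomics
instance (atomics : List (List (String × String))) (out : String) : Decidable (Spec_aggregate_queryable_status_py atomics out) := by unfold Spec_aggregate_queryable_status_py; infer_instance

-- ===== CLAIM (what is proved, stated in full; the proofs are below) =====
def Claim_equal_aggregate_queryable_status_py : Prop := ∀ (atomics : List (List (String × String))), Dom_aggregate_queryable_status_py atomics → Spec_aggregate_queryable_status_py atomics (aggregate_queryable_status_py atomics)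

-- ===== LEMMAS AND PROOFS =====

-- proof-side names for the pieces of the two programs
def pvStat (a : List (String × String)) : String :=
  PySem.Dict.getD (PySem.Dict.mk a) "queryableStatus" "fully_queryable"

def pvRk (s : String) : Option Int := PySem.Dict.get? pvRank s

def pvStep (b : Option (Int × String)) (s : String) : Option (Int × String) :=
  match pvRk s with
  | none => b
  | some i =>
    match b with
    | none => some (i, s)
    | some q => if i < q.1 then some (i, s) else b

def pvInv (i : Int) : String :=
  if i = 0 then "requires_manual" else if i = 1 then "screening_only"
  else if i = 2 then "llm_extractable" else if i = 3 then "hybrid_queryable"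
  else if i = 4 then "partially_queryable" else if i = 5 then "fully_queryable"
  else if i = 6 then "not_applicable" else ""

def pvOmin : Option Int → Option Int → Option Int
  | none, y => y
  | some i, none => some i
  | some i, some j => some (if j < i then j else i)

def pvStepI (m : Option Int) (s : String) : Option Int := pvOmin m (pvRk s)

def pvMinR : List String → Option Int
  | [] => none
  | s :: rest => pvOmin (pvRk s) (pvMinR rest)

lemma pvRank_eq : pvRank = PySem.Dict.mk
    [("requires_manual", 0), ("screening_only", 1), ("llm_extractable", 2),
     ("hybrid_queryable", 3), ("partially_queryable", 4), ("fully_queryable", 5),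
     ("not_applicable", 6)] := by decide

lemma pvRk_some (s : String) (i : Int) (h : pvRk s = some i) :
    0 ≤ i ∧ i ≤ 6 ∧ s = pvInv i := by
  unfold pvRk at h
  rw [pvRank_eq] at h
  simp only [PySem.Dict.get?_mk_cons, beq_iff_eq] at h
  split_ifs at h with h1 h2 h3 h4 h5 h6 h7 <;>
    first
      | (injection h with h'; subst h';
         refine ⟨by norm_num, by norm_num, ?_⟩;
         norm_num [pvInv] <;> simp_all)
      | simp [PySem.Dict.get?] at h

lemma pvRk_none (s : String) (h : pvRk s = none) :
    "requires_manual" ≠ s ∧ "screening_only" ≠ s ∧ "llm_extractable" ≠ s ∧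
    "hybrid_queryable" ≠ s ∧ "partially_queryable" ≠ s ∧ "fully_queryable" ≠ s ∧
    "not_applicable" ≠ s := by
  unfold pvRk at h
  rw [pvRank_eq] at h
  simp only [PySem.Dict.get?_mk_cons, beq_iff_eq] at h
  split_ifs at h with h1 h2 h3 h4 h5 h6 h7
  all_goals try simp [PySem.Dict.get?] at h
  exact ⟨h1, h2, h3, h4, h5, h6, h7⟩

lemma pvOmin_none (m : Option Int) : pvOmin m none = m := by cases m <;> rfl

lemma pvOmin_assoc (a b c : Option Int) : pvOmin (pvOmin a b) c = pvOmin a (pvOmin b c) := by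
  cases a <;> cases b <;> cases c <;>
    simp only [pvOmin, pvOmin_none] <;>
    (try split_ifs) <;> simp only [Option.some.injEq] <;> omega

-- B's loop body is A's status extraction fed to pvStep
lemma pvFoldB (atomics : List (List (String × String))) : ∀ (b : Option (Int × String)),
    atomics.foldl (fun b a =>
      let s := PySem.Dict.getD (PySem.Dict.mk a) "queryableStatus" "fully_queryable"
      match PySem.Dict.get? pvRank s with
      | none => b
      | some i =>
        match b with
        | none => some (i, s)
        | some q => if i < q.1 then some (i, s) else b) b
      = (atomics.map pvStat).foldl pvStep b := by
  induction atomics with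
  | nil => intro b; rfl
  | cons a t ih =>
    intro b
    simp only [List.foldl_cons, List.map_cons]
    exact ih _

-- B's fold, abstracted to the status list, tracks the minimal rank and its status
lemma pvFold_eq (sts : List String) : ∀ (b : Option (Int × String)),
    (∀ p, b = some p → p.2 = pvInv p.1) →
    sts.foldl pvStep b
      = (sts.foldl pvStepI (b.map (·.1))).map (fun i => (i, pvInv i)) := by
  induction sts with
  | nil =>
    intro b hb
    match b with
    | none => rfl
    | some (i, s) => simpa using hb (i, s) rfl
  | cons s rest ih =>
    intro b hb
    simp only [List.foldl_cons]
    rcases h : pvRk s with _ | i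
    · rw [show pvStep b s = b from by simp [pvStep, h],
         show pvStepI (b.map (·.1)) s = b.map (·.1) from by simp [pvStepI, h, pvOmin_none]]
      exact ih b hb
    · obtain ⟨_, _, hs⟩ := pvRk_some s i h
      match b with
      | none =>
        rw [show pvStep none s = some (i, s) from by simp [pvStep, h],
           show pvStepI ((none : Option (Int × String)).map (·.1)) s = some i from by
             simp [pvStepI, h, pvOmin]]
        have := ih (some (i, s)) (by intro p hp; cases hp; simpa using hs)
        simpa using this
      | some (j, t) =>
        have ht : t = pvInv j := hb (j, t) rfl
        by_cases hij : i < j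
        · rw [show pvStep (some (j, t)) s = some (i, s) from by simp [pvStep, h, hij],
             show pvStepI ((some ((j, t) : Int × String)).map (·.1)) s = some i from by
               simp [pvStepI, h, pvOmin, hij]]
          have := ih (some (i, s)) (by intro p hp; cases hp; simpa using hs)
          simpa using this
        · rw [show pvStep (some (j, t)) s = some (j, t) from by simp [pvStep, h, hij],
             show pvStepI ((some ((j, t) : Int × String)).map (·.1)) s = some j from by
               simp [pvStepI, h, pvOmin, hij]]
          have := ih (some (j, t)) (by intro p hp; cases hp; simpa using ht)
          simpa using this

lemma pvFoldl_omin (sts : List String) : ∀ m,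
    sts.foldl pvStepI m = pvOmin m (pvMinR sts) := by
  induction sts with
  | nil => intro m; simp [pvMinR, pvOmin_none]
  | cons s rest ih =>
    intro m
    rw [List.foldl_cons, ih, show pvStepI m s = pvOmin m (pvRk s) from rfl, pvOmin_assoc]
    rfl

-- characterisation of the minimal rank by membership, the bridge to A's scans
lemma pvMinR_none (sts : List String) (h : pvMinR sts = none) :
    ∀ p ∈ pvPriority, p ∉ sts := by
  induction sts with
  | nil => intro p _; simp
  | cons s rest ih =>
    simp only [pvMinR] at h
    rcases hr : pvRk s with _ | i
    · rcases hmr : pvMinR rest with _ | m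
      · intro p hp
        have hne := pvRk_none s hr
        have hps : p ≠ s := by fin_cases hp <;> simp_all
        have hpr := ih hmr p hp
        simp [List.mem_cons, hps, hpr]
      · rw [hr, hmr] at h; simp [pvOmin] at h
    · rw [hr] at h
      rcases hmr : pvMinR rest with _ | m <;> rw [hmr] at h <;> simp [pvOmin] at h

lemma pvInv_ne (i j : Int) (hi0 : 0 ≤ i) (hi6 : i ≤ 6) (hj0 : 0 ≤ j) (hj6 : j ≤ 6)
    (hij : i ≠ j) : pvInv i ≠ pvInv j := by
  have hi : i = 0 ∨ i = 1 ∨ i = 2 ∨ i = 3 ∨ i = 4 ∨ i = 5 ∨ i = 6 := by omega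
  have hj : j = 0 ∨ j = 1 ∨ j = 2 ∨ j = 3 ∨ j = 4 ∨ j = 5 ∨ j = 6 := by omega
  rcases hi with h|h|h|h|h|h|h <;> rcases hj with h'|h'|h'|h'|h'|h'|h' <;>
    subst h <;> subst h' <;> simp_all [pvInv]

lemma pvMinR_some (sts : List String) : ∀ (m : Int), pvMinR sts = some m →
    0 ≤ m ∧ m ≤ 6 ∧ pvInv m ∈ sts ∧ ∀ j, 0 ≤ j → j < m → pvInv j ∉ sts := by
  induction sts with
  | nil => intro m h; simp [pvMinR] at h
  | cons s rest ih =>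
    intro m h
    simp only [pvMinR] at h
    rcases hr : pvRk s with _ | i
    · rw [hr] at h
      simp only [pvOmin] at h
      obtain ⟨hm0, hm6, hmem, hlt⟩ := ih m h
      have hne := pvRk_none s hr
      have hsp : ∀ k : Int, 0 ≤ k → k ≤ 6 → pvInv k ≠ s := by
        intro k hk0 hk6
        have hk : k = 0 ∨ k = 1 ∨ k = 2 ∨ k = 3 ∨ k = 4 ∨ k = 5 ∨ k = 6 := by omega
        rcases hk with h'|h'|h'|h'|h'|h'|h' <;> subst h' <;> norm_num [pvInv] <;>
          simp_all
      refine ⟨hm0, hm6, by simp [List.mem_cons, hmem], ?_⟩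
      intro j hj0 hjm
      simp [List.mem_cons, hsp j hj0 (by omega), hlt j hj0 hjm]
    · rw [hr] at h
      obtain ⟨hi0, hi6, hs⟩ := pvRk_some s i hr
      rcases hm : pvMinR rest with _ | m'
      · rw [hm] at h
        simp only [pvOmin, Option.some.injEq] at h
        subst h
        have hrest := pvMinR_none rest hm
        refine ⟨hi0, hi6, by simp [List.mem_cons, hs], ?_⟩
        intro j hj0 hjm
        have hmemP : pvInv j ∈ pvPriority := by
          have hj : j = 0 ∨ j = 1 ∨ j = 2 ∨ j = 3 ∨ j = 4 ∨ j = 5 := by omega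
          rcases hj with h'|h'|h'|h'|h'|h' <;> subst h' <;> norm_num [pvInv, pvPriority]
        have hne : pvInv j ≠ s := by
          rw [hs]; exact pvInv_ne j i hj0 (by omega) hi0 hi6 (by omega)
        simp [List.mem_cons, hne, hrest _ hmemP]
      · rw [hm] at h
        obtain ⟨hm0', hm6', hmem', hlt'⟩ := ih m' hm
        simp only [pvOmin, Option.some.injEq] at h
        by_cases hmi : m' < i
        · rw [if_pos hmi] at h
          subst h
          refine ⟨hm0', hm6', by simp [List.mem_cons, hmem'], ?_⟩
          intro j hj0 hjm
          have hne : pvInv j ≠ s := by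
            rw [hs]; exact pvInv_ne j i hj0 (by omega) hi0 hi6 (by omega)
          simp [List.mem_cons, hne, hlt' j hj0 hjm]
        · rw [if_neg hmi] at h
          subst h
          refine ⟨hi0, hi6, by simp [List.mem_cons, hs], ?_⟩
          intro j hj0 hjm
          have hne : pvInv j ≠ s := by
            rw [hs]; exact pvInv_ne j i hj0 (by omega) hi0 hi6 (by omega)
          simp [List.mem_cons, hne, hlt' j hj0 (by omega)]

-- A's priority scan returns the status of the minimal rank present
lemma pvLoopA_eq (sts : List String) :
    pvLoopA pvPriority sts =
      (match pvMinR sts with | none => "fully_queryable" | some i => pvInv i) := by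
  rcases h : pvMinR sts with _ | m
  · have hc := pvMinR_none sts h
    have c0 : "requires_manual" ∉ sts := hc _ (by norm_num [pvPriority])
    have c1 : "screening_only" ∉ sts := hc _ (by norm_num [pvPriority])
    have c2 : "llm_extractable" ∉ sts := hc _ (by norm_num [pvPriority])
    have c3 : "hybrid_queryable" ∉ sts := hc _ (by norm_num [pvPriority])
    have c4 : "partially_queryable" ∉ sts := hc _ (by norm_num [pvPriority])
    have c5 : "fully_queryable" ∉ sts := hc _ (by norm_num [pvPriority])
    have c6 : "not_applicable" ∉ sts := hc _ (by norm_num [pvPriority])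
    simp [pvLoopA, pvPriority, c0, c1, c2, c3, c4, c5, c6]
  · obtain ⟨hm0, hm6, hmem, hlt⟩ := pvMinR_some sts m h
    have hm' : m = 0 ∨ m = 1 ∨ m = 2 ∨ m = 3 ∨ m = 4 ∨ m = 5 ∨ m = 6 := by omega
    rcases hm' with h'|h'|h'|h'|h'|h'|h' <;> subst h'
    · norm_num [pvInv] at hmem ⊢
      simp [pvLoopA, pvPriority, hmem]
    · have c0 := hlt 0 (by norm_num) (by norm_num)
      norm_num [pvInv] at hmem c0 ⊢
      simp [pvLoopA, pvPriority, hmem, c0]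
    · have c0 := hlt 0 (by norm_num) (by norm_num)
      have c1 := hlt 1 (by norm_num) (by norm_num)
      norm_num [pvInv] at hmem c0 c1 ⊢
      simp [pvLoopA, pvPriority, hmem, c0, c1]
    · have c0 := hlt 0 (by norm_num) (by norm_num)
      have c1 := hlt 1 (by norm_num) (by norm_num)
      have c2 := hlt 2 (by norm_num) (by norm_num)
      norm_num [pvInv] at hmem c0 c1 c2 ⊢
      simp [pvLoopA, pvPriority, hmem, c0, c1, c2]
    · have c0 := hlt 0 (by norm_num) (by norm_num)
      have c1 := hlt 1 (by norm_num) (by norm_num)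
      have c2 := hlt 2 (by norm_num) (by norm_num)
      have c3 := hlt 3 (by norm_num) (by norm_num)
      norm_num [pvInv] at hmem c0 c1 c2 c3 ⊢
      simp [pvLoopA, pvPriority, hmem, c0, c1, c2, c3]
    · have c0 := hlt 0 (by norm_num) (by norm_num)
      have c1 := hlt 1 (by norm_num) (by norm_num)
      have c2 := hlt 2 (by norm_num) (by norm_num)
      have c3 := hlt 3 (by norm_num) (by norm_num)
      have c4 := hlt 4 (by norm_num) (by norm_num)
      norm_num [pvInv] at hmem c0 c1 c2 c3 c4 ⊢
      simp [pvLoopA, pvPriority, hmem, c0, c1, c2, c3, c4]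
    · have c0 := hlt 0 (by norm_num) (by norm_num)
      have c1 := hlt 1 (by norm_num) (by norm_num)
      have c2 := hlt 2 (by norm_num) (by norm_num)
      have c3 := hlt 3 (by norm_num) (by norm_num)
      have c4 := hlt 4 (by norm_num) (by norm_num)
      have c5 := hlt 5 (by norm_num) (by norm_num)
      norm_num [pvInv] at hmem c0 c1 c2 c3 c4 c5 ⊢
      simp [pvLoopA, pvPriority, hmem, c0, c1, c2, c3, c4, c5]

-- ===== VERDICT (by name: the statement is the Claim_ definition above) =====
theorem aggregate_queryable_status_py_spec : Claim_equal_aggregate_queryable_status_py := by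
  intro atomics _
  unfold Spec_aggregate_queryable_status_py
  unfold aggregate_queryable_status_py aggregate_queryable_status_py_alt
  simp only []
  rw [show (fun a => PySem.Dict.getD (PySem.Dict.mk a) "queryableStatus" "fully_queryable") = pvStat from rfl]
  rw [pvFoldB, pvFold_eq _ none (by intro p hp; cases hp),
     show (Option.map (·.1) (none : Option (Int × String))) = none from rfl,
     pvFoldl_omin, show ∀ x, pvOmin none x = x from fun x => rfl, pvLoopA_eq]
  rcases pvMinR (atomics.map pvStat) with _ | i <;> rfl
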